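-- pv_equiv track=rewrite | github.com/Corentin-Monsallier/Operations-Research-Project | Balas_hammer.py | _best_candidates
-- ===== SOURCE A (Python) =====
-- def _best_candidates(row_penalties, col_penalties):
--     max_penalty = -1
--     candidates = []
--
--     # check all rows
--     for i, (pen, cell) in row_penalties.items():
--         if pen > max_penalty:
--             # new best penalty => replace everything
--             max_penalty = pen
--             candidates = [(True, i, cell)] # true = row
--         elif pen == max_penalty:
--             # if same value = we keep it also
--             candidates.append((True, i, cell))
--
--     # check all columns
--     for j, (pen, cell) in col_penalties.items():
--         if pen > max_penalty:
--             max_penalty = pen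
--             candidates = [(False, j, cell)]
--         elif pen == max_penalty:
--             candidates.append((False, j, cell))
--
--     return max_penalty, candidates
-- ===== SOURCE B (Python) =====
-- def _best_candidates(row_penalties, col_penalties):
--     # pass 1: find the maximum penalty, seeded at -1 (A's sentinel)
--     max_penalty = -1
--     for pen, _cell in row_penalties.values():
--         if pen > max_penalty:
--             max_penalty = pen
--     for pen, _cell in col_penalties.values():
--         if pen > max_penalty:
--             max_penalty = pen
--     # pass 2: collect all entries tied at the maximum, rows first
--     candidates = [(True, i, cell) for i, (pen, cell) in row_penalties.items()
--                   if pen == max_penalty]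
--     candidates += [(False, j, cell) for j, (pen, cell) in col_penalties.items()
--                    if pen == max_penalty]
--     return max_penalty, candidates
-- ===== Notes on version B (the rewrite author's own statement) =====
-- stated objective: simpler
-- what changed: Replaces A's single stateful best-so-far loop (which rebuilds/extends the candidate list as the running maximum changes) with two separate passes: one scan computing the maximum penalty seeded at -1, then filter comprehensions collecting the tied row and column entries.
import Mathlib
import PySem

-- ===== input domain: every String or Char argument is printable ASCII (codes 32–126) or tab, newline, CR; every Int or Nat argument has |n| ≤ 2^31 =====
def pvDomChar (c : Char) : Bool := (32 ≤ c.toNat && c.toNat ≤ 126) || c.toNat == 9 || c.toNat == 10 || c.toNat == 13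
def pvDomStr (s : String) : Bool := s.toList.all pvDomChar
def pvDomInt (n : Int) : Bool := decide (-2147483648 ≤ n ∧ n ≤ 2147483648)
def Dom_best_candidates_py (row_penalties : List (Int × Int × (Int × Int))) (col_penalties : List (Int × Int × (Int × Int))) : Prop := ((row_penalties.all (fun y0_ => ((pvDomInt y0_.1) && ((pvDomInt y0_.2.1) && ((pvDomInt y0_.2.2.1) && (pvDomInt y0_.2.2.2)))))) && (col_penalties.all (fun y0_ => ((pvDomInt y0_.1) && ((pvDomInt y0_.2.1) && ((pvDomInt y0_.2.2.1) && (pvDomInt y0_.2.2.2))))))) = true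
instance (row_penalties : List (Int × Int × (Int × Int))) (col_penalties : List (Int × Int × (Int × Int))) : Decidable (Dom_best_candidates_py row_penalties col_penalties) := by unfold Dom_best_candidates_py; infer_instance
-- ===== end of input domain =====

-- B replaces A's single stateful best-so-far loop by a max-scan (seeded at -1) followed by
-- filter passes collecting the tied entries, rows first; objective: simpler.

-- ===== PORT A =====
-- one iteration of A's loop body, tagged true for rows / false for cols
def pvStepA (tag : Bool) (st : Int × List (Bool × Int × (Int × Int)))
    (it : Int × Int × (Int × Int)) : Int × List (Bool × Int × (Int × Int)) :=
  if it.2.1 > st.1 then (it.2.1, [(tag, it.1, it.2.2)])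
  else if it.2.1 = st.1 then (st.1, st.2 ++ [(tag, it.1, it.2.2)])
  else st

def best_candidates_py (row_penalties : List (Int × Int × (Int × Int))) (col_penalties : List (Int × Int × (Int × Int))) : Int × (List (Bool × Int × (Int × Int))) :=
  col_penalties.foldl (pvStepA false) (row_penalties.foldl (pvStepA true) (-1, []))

-- ===== PORT B =====
-- pass 1: running maximum
def pvMaxStep (m : Int) (it : Int × Int × (Int × Int)) : Int :=
  if it.2.1 > m then it.2.1 else m

-- pass 2: the tied entries of one table, tagged
def pvTied (tag : Bool) (m : Int) (l : List (Int × Int × (Int × Int))) : List (Bool × Int × (Int × Int)) :=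
  (l.filter (fun it => it.2.1 = m)).map (fun it => (tag, it.1, it.2.2))

-- assemble the result pair from the computed maximum (Source B's 'return max_penalty, candidates')
def pvPack (m : Int) (rp cp : List (Int × Int × (Int × Int))) : Int × (List (Bool × Int × (Int × Int))) :=
  (m, pvTied true m rp ++ pvTied false m cp)

def best_candidates_py_alt (row_penalties : List (Int × Int × (Int × Int))) (col_penalties : List (Int × Int × (Int × Int))) : Int × (List (Bool × Int × (Int × Int))) :=
  pvPack (col_penalties.foldl pvMaxStep (row_penalties.foldl pvMaxStep (-1))) row_penalties col_penalties

-- ===== PRECONDITION & SPEC =====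
def Spec_best_candidates_py (row_penalties : List (Int × Int × (Int × Int))) (col_penalties : List (Int × Int × (Int × Int))) (out : Int × (List (Bool × Int × (Int × Int)))) : Prop := out = best_candidates_py_alt row_penalties col_penalties
instance (row_penalties : List (Int × Int × (Int × Int))) (col_penalties : List (Int × Int × (Int × Int))) (out : Int × (List (Bool × Int × (Int × Int)))) : Decidable (Spec_best_candidates_py row_penalties col_penalties out) := by unfold Spec_best_candidates_py; infer_instance

-- ===== CLAIM (what is proved, stated in full; the proofs are below) =====
def Claim_equal_best_candidates_py : Prop := ∀ (row_penalties : List (Int × Int × (Int × Int))) (col_penalties : List (Int × Int × (Int × Int))), Dom_best_candidates_py row_penalties col_penalties → Spec_best_candidates_py row_penalties col_penalties (best_candidates_py row_penalties col_penalties)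

-- ===== LEMMAS AND PROOFS =====

-- the running maximum never decreases
theorem pvMax_le (l : List (Int × Int × (Int × Int))) (m : Int) :
    m ≤ l.foldl pvMaxStep m := by
  induction l generalizing m with
  | nil => simp
  | cons a t ih =>
    refine le_trans ?_ (ih (pvMaxStep m a))
    simp only [pvMaxStep]; split <;> omega

-- every penalty in the list is ≤ the final running maximum
theorem pvMax_bound (l : List (Int × Int × (Int × Int))) (m : Int) :
    ∀ it ∈ l, it.2.1 ≤ l.foldl pvMaxStep m := by
  induction l generalizing m with
  | nil => simp
  | cons a t ih =>
    intro it hit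
    rcases List.mem_cons.mp hit with h1 | hmem
    · subst h1
      refine le_trans ?_ (pvMax_le t (pvMaxStep m it))
      simp only [pvMaxStep]; split <;> omega
    · exact ih (pvMaxStep m a) it hmem

-- characterisation of one phase of A's loop: starting from any state (m0, c0),
-- it computes the running maximum M of the phase and the entries tied at M,
-- keeping c0 exactly when the maximum did not move.
theorem pvPhase (tag : Bool) (l : List (Int × Int × (Int × Int)))
    (m0 : Int) (c0 : List (Bool × Int × (Int × Int))) :
    l.foldl (pvStepA tag) (m0, c0) =
      (l.foldl pvMaxStep m0,
       (if l.foldl pvMaxStep m0 = m0 then c0 else []) ++ pvTied tag (l.foldl pvMaxStep m0) l) := by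
  induction l generalizing m0 c0 with
  | nil => simp [pvTied]
  | cons hd t ih =>
    obtain ⟨i, pen, cell⟩ := hd
    simp only [List.foldl_cons]
    by_cases hgt : pen > m0
    · have hstep : pvStepA tag (m0, c0) (i, pen, cell) = (pen, [(tag, i, cell)]) := by
        simp [pvStepA, hgt]
      have hmax : pvMaxStep m0 (i, pen, cell) = pen := by simp [pvMaxStep, hgt]
      simp only [hstep, hmax, ih]
      have hM : m0 < t.foldl pvMaxStep pen := lt_of_lt_of_le hgt (pvMax_le t pen)
      have hne : ¬ t.foldl pvMaxStep pen = m0 := by omega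
      simp only [hne, if_false, List.nil_append]
      by_cases he : t.foldl pvMaxStep pen = pen
      · simp [he, pvTied]
      · have hpen : ¬ pen = t.foldl pvMaxStep pen := fun h => he h.symm
        simp [he, pvTied, hpen]
    · have hmax : pvMaxStep m0 (i, pen, cell) = m0 := by simp [pvMaxStep, hgt]
      by_cases heq : pen = m0
      · have hstep : pvStepA tag (m0, c0) (i, pen, cell) = (m0, c0 ++ [(tag, i, cell)]) := by
          simp [pvStepA, heq]
        simp only [hstep, hmax, ih]
        by_cases hM : t.foldl pvMaxStep m0 = m0
        · simp [hM, pvTied, heq]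
        · have hpen : ¬ pen = t.foldl pvMaxStep m0 := by
            intro h; exact hM (by omega)
          simp [hM, pvTied, hpen]
      · have hstep : pvStepA tag (m0, c0) (i, pen, cell) = (m0, c0) := by
          simp [pvStepA, heq]; omega
        simp only [hstep, hmax, ih]
        have hm0 := pvMax_le t m0
        have hpen : ¬ pen = t.foldl pvMaxStep m0 := by omega
        simp [pvTied, hpen]

-- when the overall maximum exceeds every penalty of a table, its tied list is empty
theorem pvTied_nil (tag : Bool) (l : List (Int × Int × (Int × Int))) (m M : Int)
    (hm : l.foldl pvMaxStep m ≠ M) (hle : l.foldl pvMaxStep m ≤ M) :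
    pvTied tag M l = [] := by
  unfold pvTied
  rw [List.filter_eq_nil_iff.mpr, List.map_nil]
  intro it hit
  have := pvMax_bound l m it hit
  simp only [decide_eq_true_eq]
  omega

-- ===== VERDICT (by name: the statement is the Claim_ definition above) =====
theorem best_candidates_py_spec : Claim_equal_best_candidates_py := by
  intro rp cp _
  show best_candidates_py rp cp = best_candidates_py_alt rp cp
  unfold best_candidates_py best_candidates_py_alt pvPack
  rw [pvPhase true rp (-1) [], pvPhase false cp]
  by_cases h : cp.foldl pvMaxStep (rp.foldl pvMaxStep (-1)) = rp.foldl pvMaxStep (-1)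
  · simp [h]
  · simp only [h, if_false, List.nil_append]
    rw [pvTied_nil true rp (-1) _ (fun he => h he.symm) (pvMax_le cp _), List.nil_append]
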